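-- pv_equiv track=rewrite | github.com/lorimer1/advent_of_code | 2023/03 Gear Ratios/aoc_202303.py | get_gear_ratios
-- ===== SOURCE A (Python) =====
-- def get_sym_part_coords(
--     grid: list[str], r_idx: int, c_idx: int
-- ) -> set[tuple[int, int]]:
--     sym_part_coords = set()
--     # symbol found, test coords around symbol for digit
--     for test_r_idx in range(r_idx - 1, r_idx + 2):
--         for test_c_idx in range(c_idx - 1, c_idx + 2):
--             if (
--                 test_r_idx < 0
--                 or test_r_idx >= len(grid)
--                 or test_c_idx < 0
--                 or test_c_idx >= len(grid[test_r_idx])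
--                 or not grid[test_r_idx][test_c_idx].isdigit()
--             ):
--                 continue
--             # digit found, test for beginning of number and store it's coord
--             while test_c_idx > 0 and grid[test_r_idx][test_c_idx - 1].isdigit():
--                 test_c_idx -= 1
--             sym_part_coords.add((test_r_idx, test_c_idx))
--     return sym_part_coords
--
-- def get_part_nums(grid: list[str], num_coords: set[tuple[int, int]]) -> list[int]:
--     part_nums = []
--     for r_idx, c_idx in num_coords:
--         s = ""
--         while c_idx < len(grid[r_idx]) and grid[r_idx][c_idx].isdigit():
--             s += grid[r_idx][c_idx]
--             c_idx += 1
--         part_nums.append(int(s))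
--     return part_nums
--
-- def get_gear_ratios(grid: list[str]) -> list[int]:
--     gear_ratios = []
--     for r_idx, row in enumerate(grid):
--         for c_idx, char in enumerate(row):
--             if char != "*":
--                 continue
--             sym_part_coords = get_sym_part_coords(grid, r_idx, c_idx)
--             if len(sym_part_coords) == 2:
--                 sym_part_nums = get_part_nums(grid, sym_part_coords)
--                 gear_ratios.append(sym_part_nums[0] * sym_part_nums[1])
--     return gear_ratios
-- ===== SOURCE B (Python) =====
-- def get_gear_ratios(grid: list[str]) -> list[int]:
--     # Pass 1: parse every number in the grid once, as (row, col_start, col_end, value).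
--     nums = []
--     for r, row in enumerate(grid):
--         c = 0
--         n = len(row)
--         while c < n:
--             if row[c].isdigit():
--                 start = c
--                 run = []
--                 while c < n and row[c].isdigit():
--                     run.append(row[c])
--                     c += 1
--                 nums.append((r, start, c - 1, int("".join(run))))
--             else:
--                 c += 1
--     # Pass 2: for each '*', pick the parsed numbers whose span touches its 3x3 box.
--     gear_ratios = []
--     for r, row in enumerate(grid):
--         for c, ch in enumerate(row):
--             if ch == "*":
--                 adj = [v for (nr, cs, ce, v) in nums
--                        if r - 1 <= nr <= r + 1 and cs <= c + 1 and c - 1 <= ce]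
--                 if len(adj) == 2:
--                     gear_ratios.append(adj[0] * adj[1])
--     return gear_ratios
-- ===== Notes on version B (the rewrite author's own statement) =====
-- stated objective: alternative
-- what changed: A backtracks from every digit cell in each gear's 3x3 box to find number starts and collects them in a set; B first parses the whole grid once into a list of numbers (row, col_start, col_end, value) and then selects, for each '*', the parsed numbers whose span overlaps the gear's 3x3 box by a range test.
import Mathlib
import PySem

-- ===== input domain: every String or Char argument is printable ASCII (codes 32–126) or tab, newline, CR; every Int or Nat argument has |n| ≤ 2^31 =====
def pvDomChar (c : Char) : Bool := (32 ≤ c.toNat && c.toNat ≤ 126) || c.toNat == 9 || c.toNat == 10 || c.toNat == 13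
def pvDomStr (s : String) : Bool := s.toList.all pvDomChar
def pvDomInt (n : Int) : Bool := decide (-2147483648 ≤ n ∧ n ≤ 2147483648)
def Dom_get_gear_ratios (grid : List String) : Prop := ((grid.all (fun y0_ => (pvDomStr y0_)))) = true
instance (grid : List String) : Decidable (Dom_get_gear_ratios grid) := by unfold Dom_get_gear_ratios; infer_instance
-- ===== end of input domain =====

-- B replaces A's per-gear 3x3 backtracking (set of number-start coordinates) by one upfront parse of all
-- numbers with their column spans, selected per '*' by a range-overlap test; objective: alternative.

-- ===== PORT A =====
-- while test_c_idx > 0 and grid[test_r_idx][test_c_idx - 1].isdigit(): test_c_idx -= 1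
-- (pyGetD with a non-digit default is exact here: every call site has 0 <= tc-1 < len row)
def pvBackA (row : List Char) (tc : Int) : Int :=
  if h : 0 < tc ∧ PySem.Chars.isdigit (PySem.List.pyGetD row (tc - 1) ' ') = true then
    pvBackA row (tc - 1)
  else tc
termination_by tc.toNat
decreasing_by omega

-- the while loop of get_part_nums building s (chars of the number at column c)
def pvReadChars (row : List Char) (c : Int) : List Char :=
  if h : c < (row.length : Int) ∧ PySem.Chars.isdigit (PySem.List.pyGetD row c ' ') = true then
    PySem.List.pyGetD row c ' ' :: pvReadChars row (c + 1)
  else []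
termination_by ((row.length : Int) - c).toNat
decreasing_by omega

-- get_sym_part_coords; the or-chain is evaluated without short-circuit, exact because pyGetD g tr []
-- yields the empty row out of range, making the length test fail the same way Python's short-circuit does
def pvSymPartCoords (g : List (List Char)) (r c : Int) : PySem.Set (Int × Int) :=
  (PySem.List.pyRange (r - 1) (r + 2) 1).foldl (fun s tr =>
    (PySem.List.pyRange (c - 1) (c + 2) 1).foldl (fun s tc =>
      if tr < 0 ∨ (g.length : Int) ≤ tr ∨ tc < 0 ∨ ((PySem.List.pyGetD g tr []).length : Int) ≤ tc
          ∨ ¬ PySem.Chars.isdigit (PySem.List.pyGetD (PySem.List.pyGetD g tr []) tc ' ') = true then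
        s
      else PySem.Set.add s (tr, pvBackA (PySem.List.pyGetD g tr []) tc)) s) PySem.Set.empty

-- get_part_nums; int(s) never fails at reachable call sites (s is a nonempty digit string), ported as getD 0.
-- Python iterates the coord set in hash order; the only consumer multiplies the two elements, which is
-- order-independent, so iterating in insertion order is exact for the entry function's result.
def pvGetPartNums (g : List (List Char)) (coords : List (Int × Int)) : List Int :=
  coords.foldl (fun acc rc =>
    acc ++ [(PySem.Int.ofChars? (pvReadChars (PySem.List.pyGetD g rc.1 []) rc.2)).getD 0]) []

def get_gear_ratios (grid : List String) : List Int :=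
  let g := grid.map (·.toList)
  (PySem.List.enumerate g 0).foldl (fun acc p =>
    (PySem.List.enumerate p.2 0).foldl (fun acc q =>
      if q.2 ≠ '*' then acc
      else
        let spc := pvSymPartCoords g p.1 q.1
        if PySem.Set.len spc = 2 then
          let ns := pvGetPartNums g spc
          acc ++ [PySem.List.pyGetD ns 0 0 * PySem.List.pyGetD ns 1 0]
        else acc) acc) []

-- ===== PORT B =====
-- Source B pass 1 inner while loop: maximal digit runs of one row as (row, col_start, col_end, value)
def pvParseRow (r : Int) (c : Int) (s : List Char) : List (Int × Int × Int × Int) :=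
  match s with
  | [] => []
  | ch :: rest =>
    if PySem.Chars.isdigit ch = true then
      let run := (ch :: rest).takeWhile (fun d => PySem.Chars.isdigit d)
      (r, c, c + run.length - 1, (PySem.Int.ofChars? run).getD 0)
        :: pvParseRow r (c + run.length) ((ch :: rest).dropWhile (fun d => PySem.Chars.isdigit d))
    else pvParseRow r (c + 1) rest
termination_by s.length
decreasing_by
  · rename_i hd
    rw [List.dropWhile_cons_of_pos (by simpa using hd)]
    exact Nat.lt_succ_of_le (List.length_dropWhile_le _ _)
  · simp

def pvNums (g : List (List Char)) : List (Int × Int × Int × Int) :=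
  (PySem.List.enumerate g 0).foldl (fun acc p => acc ++ pvParseRow p.1 0 p.2) []

def get_gear_ratios_alt (grid : List String) : List Int :=
  let g := grid.map (·.toList)
  let nums := pvNums g
  (PySem.List.enumerate g 0).foldl (fun acc p =>
    (PySem.List.enumerate p.2 0).foldl (fun acc q =>
      if q.2 = '*' then
        let adj := (nums.filter (fun t =>
          decide (p.1 - 1 ≤ t.1 ∧ t.1 ≤ p.1 + 1 ∧ t.2.1 ≤ q.1 + 1 ∧ q.1 - 1 ≤ t.2.2.1))).map
          (fun t => t.2.2.2)
        if adj.length = 2 then acc ++ [PySem.List.pyGetD adj 0 0 * PySem.List.pyGetD adj 1 0]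
        else acc
      else acc) acc) []

-- ===== PRECONDITION & SPEC =====
def Spec_get_gear_ratios (grid : List String) (out : List Int) : Prop := out = get_gear_ratios_alt grid
instance (grid : List String) (out : List Int) : Decidable (Spec_get_gear_ratios grid out) := by unfold Spec_get_gear_ratios; infer_instance

-- ===== CLAIM (what is proved, stated in full; the proofs are below) =====
def Claim_equal_get_gear_ratios : Prop := ∀ (grid : List String), Dom_get_gear_ratios grid → Spec_get_gear_ratios grid (get_gear_ratios grid)

-- ===== LEMMAS AND PROOFS =====

-- digB row t: Python's `0 <= t < len(row) and row[t].isdigit()`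
def digB (row : List Char) (t : Int) : Bool :=
  decide (0 ≤ t) && decide (t < (row.length : Int)) && PySem.Chars.isdigit (PySem.List.pyGetD row t ' ')

-- length of the maximal digit run starting at column cs
def pvL (row : List Char) (cs : Nat) : Nat :=
  ((row.drop cs).takeWhile (fun d => PySem.Chars.isdigit d)).length

-- value of the digit run starting at column cs
def pvVal (row : List Char) (cs : Nat) : Int :=
  (PySem.Int.ofChars? ((row.drop cs).takeWhile (fun d => PySem.Chars.isdigit d))).getD 0

-- the run record B's parse produces for the run starting at cs
def pvRun (r : Int) (row : List Char) (cs : Nat) : Int × Int × Int × Int :=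
  (r, (cs : Int), (cs : Int) + (pvL row cs : Int) - 1, pvVal row cs)

-- window cells kept by A after set-deduplication: leftmost cell of each run piece inside [c-1,c+1]
def pvT (row : List Char) (c : Int) : List Int :=
  (if digB row (c - 1) then [c - 1] else []) ++
  (if digB row c && !digB row (c - 1) then [c] else []) ++
  (if digB row (c + 1) && !digB row c then [c + 1] else [])

theorem digB_iff (row : List Char) (t : Int) : digB row t = true ↔
    0 ≤ t ∧ t < (row.length : Int) ∧ PySem.Chars.isdigit (PySem.List.pyGetD row t ' ') = true := by
  rw [digB]; simp [and_assoc]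

theorem digB_lt (row : List Char) (cs : Nat) (h : cs < row.length) :
    digB row (cs : Int) = PySem.Chars.isdigit row[cs] := by
  simp [digB, h, PySem.List.pyGetD_natCast]

theorem digB_ge (row : List Char) (cs : Nat) (h : ¬ cs < row.length) : digB row (cs : Int) = false := by
  simp [digB]; omega

theorem pvL_zero (row : List Char) (cs : Nat) (h : digB row (cs : Int) = false) : pvL row cs = 0 := by
  by_cases hlt : cs < row.length
  · rw [digB_lt row cs hlt] at h
    unfold pvL
    rw [List.drop_eq_getElem_cons hlt, List.takeWhile_cons, if_neg (by simp [h])]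
    rfl
  · unfold pvL
    rw [List.drop_of_length_le (by omega)]
    rfl

theorem pvL_succ (row : List Char) (cs : Nat) (h : digB row (cs : Int) = true) :
    pvL row cs = pvL row (cs + 1) + 1 := by
  have hlt : cs < row.length := by
    by_contra hc; rw [digB_ge row cs hc] at h; exact absurd h (by simp)
  rw [digB_lt row cs hlt] at h
  unfold pvL
  rw [List.drop_eq_getElem_cons hlt, List.takeWhile_cons, if_pos h]
  simp [Nat.add_comm]

theorem pvL_pos (row : List Char) (cs : Nat) (h : digB row (cs : Int) = true) : 0 < pvL row cs := by
  rw [pvL_succ row cs h]; omega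

theorem dig_of_lt_L (row : List Char) (cs : Nat) :
    ∀ k : Nat, k < pvL row cs → digB row ((cs : Int) + k) = true := by
  intro k
  induction k generalizing cs with
  | zero =>
    intro hk
    by_cases h : digB row (cs : Int) = true
    · simpa using h
    · rw [pvL_zero row cs (by simpa using h)] at hk; omega
  | succ n ih =>
    intro hk
    have hd : digB row (cs : Int) = true := by
      by_contra h
      rw [pvL_zero row cs (by simpa using h)] at hk; omega
    rw [pvL_succ row cs hd] at hk
    have := ih (cs + 1) (by omega)
    have hc : ((cs + 1 : Nat) : Int) + (n : Int) = (cs : Int) + ((n + 1 : Nat) : Int) := by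
      push_cast; ring
    rwa [hc] at this

theorem dig_L_end (row : List Char) (cs : Nat) : digB row ((cs : Int) + (pvL row cs : Int)) = false := by
  suffices h : ∀ n cs : Nat, pvL row cs = n → digB row ((cs : Int) + (n : Int)) = false by
    exact h (pvL row cs) cs rfl
  intro n
  induction n with
  | zero =>
    intro cs hL
    by_cases h : digB row (cs : Int) = true
    · rw [pvL_succ row cs h] at hL; omega
    · simpa using (by simpa using h : digB row (cs : Int) = false)
  | succ n ih =>
    intro cs hL
    have hd : digB row (cs : Int) = true := by
      by_contra h
      rw [pvL_zero row cs (by simpa using h)] at hL; omega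
    rw [pvL_succ row cs hd] at hL
    have := ih (cs + 1) (by omega)
    have hc : ((cs + 1 : Nat) : Int) + (n : Int) = (cs : Int) + ((n + 1 : Nat) : Int) := by
      push_cast; ring
    rwa [hc] at this

theorem back_stop (row : List Char) (t : Int) (h : digB row (t - 1) = false) (_h0 : 0 ≤ t)
    (hlt : t ≤ (row.length : Int)) : pvBackA row t = t := by
  rw [pvBackA, dif_neg]
  rintro ⟨hpos, hdig⟩
  rw [digB] at h
  simp only [Bool.and_eq_false_iff, decide_eq_false_iff_not] at h
  rcases h with (h | h) | h
  · omega
  · omega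
  · simp [hdig] at h

theorem back_step (row : List Char) (t : Int) (h : digB row (t - 1) = true) :
    pvBackA row t = pvBackA row (t - 1) := by
  rw [digB_iff] at h
  rw [pvBackA, dif_pos ⟨by omega, h.2.2⟩]

theorem back_in_run (row : List Char) (cs : Nat) (hb : digB row ((cs : Int) - 1) = false) :
    ∀ k : Nat, k < pvL row cs → pvBackA row ((cs : Int) + k) = cs := by
  intro k
  induction k with
  | zero =>
    intro hk
    have hd : digB row (cs : Int) = true := by
      have := dig_of_lt_L row cs 0 hk; simpa using this
    rw [digB_iff] at hd
    simpa using back_stop row (cs : Int) hb (by omega) (by omega)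
  | succ n ih =>
    intro hk
    have hdn : digB row ((cs : Int) + n) = true := dig_of_lt_L row cs n (by omega)
    have hstep := back_step row ((cs : Int) + (n + 1 : Nat)) (by
      rw [show ((cs : Int) + ((n + 1 : Nat) : Int)) - 1 = (cs : Int) + n by push_cast; ring]
      exact hdn)
    rw [hstep, show ((cs : Int) + ((n + 1 : Nat) : Int)) - 1 = (cs : Int) + n by push_cast; ring]
    exact ih (by omega)

theorem read_eq (row : List Char) : ∀ t : Nat,
    pvReadChars row (t : Int) = (row.drop t).takeWhile (fun d => PySem.Chars.isdigit d) := by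
  suffices h : ∀ n t : Nat, row.length - t = n →
      pvReadChars row (t : Int) = (row.drop t).takeWhile (fun d => PySem.Chars.isdigit d) by
    intro t; exact h (row.length - t) t rfl
  intro n
  induction n with
  | zero =>
    intro t ht
    have hge : ¬ t < row.length := by omega
    rw [pvReadChars, dif_neg (by rintro ⟨h1, _⟩; omega)]
    rw [List.drop_of_length_le (by omega)]
    rfl
  | succ n ih =>
    intro t ht
    have hlt : t < row.length := by omega
    by_cases hd : PySem.Chars.isdigit row[t] = true
    · rw [pvReadChars, dif_pos ⟨by exact_mod_cast hlt, by
        rw [PySem.List.pyGetD_eq_getElem row ' ' (by omega) (by exact_mod_cast hlt)]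
        simpa using hd⟩]
      rw [List.drop_eq_getElem_cons hlt, List.takeWhile_cons, if_pos hd]
      rw [PySem.List.pyGetD_eq_getElem row ' ' (by omega) (by exact_mod_cast hlt)]
      have := ih (t + 1) (by omega)
      rw [show ((t : Int) + 1) = ((t + 1 : Nat) : Int) by push_cast; ring, this]
      simp
    · rw [pvReadChars, dif_neg (by
        rintro ⟨h1, h2⟩
        rw [PySem.List.pyGetD_eq_getElem row ' ' (by omega) (by exact_mod_cast hlt)] at h2
        simp at h2
        exact hd (by simpa using h2))]
      rw [List.drop_eq_getElem_cons hlt, List.takeWhile_cons, if_neg (by simp [hd])]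

-- parse facts ------------------------------------------------------------

theorem pv_dropWhile {α : Type} (l : List α) (p : α → Bool) :
    l.dropWhile p = l.drop (l.takeWhile p).length := by
  induction l with
  | nil => simp
  | cons a t ih => by_cases h : p a <;> simp [h, ih]

theorem parse_nil (r : Int) (row : List Char) (c0 : Nat) (h : row.length ≤ c0) :
    pvParseRow r (c0 : Int) (row.drop c0) = [] := by
  rw [List.drop_of_length_le h, pvParseRow]

theorem parse_skip (r : Int) (row : List Char) (c0 : Nat) (hlt : c0 < row.length)
    (hd : PySem.Chars.isdigit row[c0] = false) :
    pvParseRow r (c0 : Int) (row.drop c0) =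
      pvParseRow r ((c0 + 1 : Nat) : Int) (row.drop (c0 + 1)) := by
  conv_lhs => rw [List.drop_eq_getElem_cons hlt]
  rw [pvParseRow, if_neg (by simp [hd])]
  push_cast
  rfl

theorem parse_digit (r : Int) (row : List Char) (c0 : Nat) (hlt : c0 < row.length)
    (hd : PySem.Chars.isdigit row[c0] = true) :
    pvParseRow r (c0 : Int) (row.drop c0) =
      pvRun r row c0 ::
        pvParseRow r ((c0 + pvL row c0 : Nat) : Int) (row.drop (c0 + pvL row c0)) := by
  conv_lhs => rw [List.drop_eq_getElem_cons hlt]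
  rw [pvParseRow, if_pos (by simp [hd])]
  rw [← List.drop_eq_getElem_cons hlt]
  rw [pv_dropWhile, List.drop_drop]
  have hL : (((row.drop c0).takeWhile (fun d => PySem.Chars.isdigit d)).length) = pvL row c0 := rfl
  rw [hL]
  congr 1

theorem digB_neg (row : List Char) (t : Int) (h : t < 0) : digB row t = false := by
  rw [digB]; simp; omega

def pvInv (row : List Char) (c0 : Nat) : Prop :=
  c0 = 0 ∨ digB row ((c0 : Int) - 1) = false ∨ digB row (c0 : Int) = false

theorem parse_mem (r : Int) (row : List Char) : ∀ c0 : Nat, pvInv row c0 →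
    ∀ q ∈ pvParseRow r (c0 : Int) (row.drop c0),
      ∃ cs : Nat, q = pvRun r row cs ∧ c0 ≤ cs ∧ digB row (cs : Int) = true ∧
        digB row ((cs : Int) - 1) = false := by
  suffices h : ∀ n c0 : Nat, row.length - c0 ≤ n → pvInv row c0 →
      ∀ q ∈ pvParseRow r (c0 : Int) (row.drop c0),
        ∃ cs : Nat, q = pvRun r row cs ∧ c0 ≤ cs ∧ digB row (cs : Int) = true ∧
          digB row ((cs : Int) - 1) = false by
    intro c0 hinv q hq; exact h (row.length - c0) c0 le_rfl hinv q hq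
  intro n
  induction n with
  | zero =>
    intro c0 hn _ q hq
    rw [parse_nil r row c0 (by omega)] at hq
    simp at hq
  | succ n ih =>
    intro c0 hn hinv q hq
    by_cases hlt : c0 < row.length
    · by_cases hd : PySem.Chars.isdigit row[c0] = true
      · rw [parse_digit r row c0 hlt hd] at hq
        have hdig : digB row (c0 : Int) = true := by rw [digB_lt row c0 hlt]; exact hd
        rcases List.mem_cons.mp hq with hq | hq
        · refine ⟨c0, hq, le_rfl, hdig, ?_⟩
          rcases hinv with h0 | hb | hb
          · subst h0; exact digB_neg row _ (by omega)
          · exact hb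
          · rw [hdig] at hb; exact absurd hb (by simp)
        · have hL1 : 0 < pvL row c0 := pvL_pos row c0 hdig
          have hinv' : pvInv row (c0 + pvL row c0) := by
            right; right
            have := dig_L_end row c0
            rwa [show ((c0 : Int) + (pvL row c0 : Int)) = ((c0 + pvL row c0 : Nat) : Int) by push_cast; ring] at this
          obtain ⟨cs, h1, h2, h3, h4⟩ := ih (c0 + pvL row c0) (by omega) hinv' q hq
          exact ⟨cs, h1, by omega, h3, h4⟩
      · rw [parse_skip r row c0 hlt (by simpa using hd)] at hq
        have hinv' : pvInv row (c0 + 1) := by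
          right; left
          rw [show ((c0 + 1 : Nat) : Int) - 1 = (c0 : Int) by push_cast; ring]
          rw [digB_lt row c0 hlt]; simpa using hd
        obtain ⟨cs, h1, h2, h3, h4⟩ := ih (c0 + 1) (by omega) hinv' q hq
        exact ⟨cs, h1, by omega, h3, h4⟩
    · rw [parse_nil r row c0 (by omega)] at hq
      simp at hq

theorem parse_cover (r : Int) (row : List Char) : ∀ c0 : Nat,
    ∀ t : Nat, c0 ≤ t → digB row (t : Int) = true →
      ∃ q ∈ pvParseRow r (c0 : Int) (row.drop c0), q.2.1 ≤ (t : Int) ∧ (t : Int) ≤ q.2.2.1 := by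
  suffices h : ∀ n c0 : Nat, row.length - c0 ≤ n →
      ∀ t : Nat, c0 ≤ t → digB row (t : Int) = true →
        ∃ q ∈ pvParseRow r (c0 : Int) (row.drop c0), q.2.1 ≤ (t : Int) ∧ (t : Int) ≤ q.2.2.1 by
    intro c0 t ht hd; exact h (row.length - c0) c0 le_rfl t ht hd
  intro n
  induction n with
  | zero =>
    intro c0 hn t ht hd
    rw [digB_iff] at hd
    omega
  | succ n ih =>
    intro c0 hn t ht hd
    have htlt : t < row.length := by
      have := hd; rw [digB_iff] at this; omega
    have hlt : c0 < row.length := by omega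
    by_cases hd0 : PySem.Chars.isdigit row[c0] = true
    · rw [parse_digit r row c0 hlt hd0]
      have hdig : digB row (c0 : Int) = true := by rw [digB_lt row c0 hlt]; exact hd0
      have hL1 : 0 < pvL row c0 := pvL_pos row c0 hdig
      by_cases hin : t < c0 + pvL row c0
      · refine ⟨pvRun r row c0, List.mem_cons_self, ?_, ?_⟩
        · simp [pvRun]; omega
        · simp [pvRun]; push_cast; omega
      · obtain ⟨q, hq, h1, h2⟩ := ih (c0 + pvL row c0) (by omega) t (by omega) hd
        exact ⟨q, List.mem_cons_of_mem _ hq, h1, h2⟩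
    · rw [parse_skip r row c0 hlt (by simpa using hd0)]
      have hne : c0 ≠ t := by
        intro h0; subst h0
        rw [digB_lt row c0 hlt] at hd
        exact hd0 hd
      exact ih (c0 + 1) (by omega) t (by omega) hd

theorem parse_sorted (r : Int) (row : List Char) : ∀ c0 : Nat, pvInv row c0 →
    (pvParseRow r (c0 : Int) (row.drop c0)).Pairwise (fun a b => a.2.2.1 < b.2.1) := by
  suffices h : ∀ n c0 : Nat, row.length - c0 ≤ n → pvInv row c0 →
      (pvParseRow r (c0 : Int) (row.drop c0)).Pairwise (fun a b => a.2.2.1 < b.2.1) by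
    intro c0 hinv; exact h (row.length - c0) c0 le_rfl hinv
  intro n
  induction n with
  | zero =>
    intro c0 hn _
    rw [parse_nil r row c0 (by omega)]
    exact List.Pairwise.nil
  | succ n ih =>
    intro c0 hn hinv
    by_cases hlt : c0 < row.length
    · by_cases hd : PySem.Chars.isdigit row[c0] = true
      · rw [parse_digit r row c0 hlt hd]
        have hdig : digB row (c0 : Int) = true := by rw [digB_lt row c0 hlt]; exact hd
        have hL1 : 0 < pvL row c0 := pvL_pos row c0 hdig
        have hinv' : pvInv row (c0 + pvL row c0) := by
          right; right
          have := dig_L_end row c0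
          rwa [show ((c0 : Int) + (pvL row c0 : Int)) = ((c0 + pvL row c0 : Nat) : Int) by push_cast; ring] at this
        refine List.Pairwise.cons ?_ (ih (c0 + pvL row c0) (by omega) hinv')
        intro b hb
        obtain ⟨cs, h1, h2, _, _⟩ := parse_mem r row (c0 + pvL row c0) hinv' b hb
        subst h1
        simp [pvRun]; push_cast; omega
      · rw [parse_skip r row c0 hlt (by simpa using hd)]
        have hinv' : pvInv row (c0 + 1) := by
          right; left
          rw [show ((c0 + 1 : Nat) : Int) - 1 = (c0 : Int) by push_cast; ring]
          rw [digB_lt row c0 hlt]; simpa using hd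
        exact ih (c0 + 1) (by omega) hinv'
    · rw [parse_nil r row c0 (by omega)]
      exact List.Pairwise.nil

-- per-row equality -------------------------------------------------------

theorem back_spec (row : List Char) (t : Int) (hd : digB row t = true) :
    ∃ cs : Nat, pvBackA row t = (cs : Int) ∧ digB row ((cs : Int) - 1) = false ∧
      (cs : Int) ≤ t ∧ t < (cs : Int) + (pvL row cs : Int) := by
  suffices h : ∀ n : Nat, ∀ t : Int, t.toNat ≤ n → digB row t = true →
      ∃ cs : Nat, pvBackA row t = (cs : Int) ∧ digB row ((cs : Int) - 1) = false ∧
        (cs : Int) ≤ t ∧ t < (cs : Int) + (pvL row cs : Int) by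
    exact h t.toNat t le_rfl hd
  intro n
  induction n with
  | zero =>
    intro t ht hd
    have h0 : 0 ≤ t ∧ t < (row.length : Int) := by rw [digB_iff] at hd; exact ⟨hd.1, hd.2.1⟩
    have ht0 : t = 0 := by omega
    subst ht0
    have hb : digB row (0 - 1) = false := digB_neg row _ (by omega)
    refine ⟨0, by simpa using back_stop row 0 hb (by omega) (by omega), by simpa using hb, by omega, ?_⟩
    have : digB row ((0 : Nat) : Int) = true := by simpa using hd
    have := pvL_pos row 0 this
    simp; omega
  | succ n ih =>
    intro t ht hd
    have h0 : 0 ≤ t ∧ t < (row.length : Int) := by rw [digB_iff] at hd; exact ⟨hd.1, hd.2.1⟩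
    by_cases hb : digB row (t - 1) = true
    · have h1 : 0 ≤ t - 1 := by rw [digB_iff] at hb; omega
      obtain ⟨cs, e1, e2, e3, e4⟩ := ih (t - 1) (by omega) hb
      refine ⟨cs, by rw [back_step row t hb]; exact e1, e2, by omega, ?_⟩
      rcases lt_or_eq_of_le (show t ≤ (cs : Int) + (pvL row cs : Int) by omega) with h | h
      · exact h
      · exfalso
        have := dig_L_end row cs
        rw [← h] at this
        rw [this] at hd
        exact absurd hd (by simp)
    · have hstop := back_stop row t (by simpa using hb) (by omega) (by omega)
      refine ⟨t.toNat, ?_, ?_, by omega, ?_⟩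
      · rw [hstop]; omega
      · rw [show ((t.toNat : Nat) : Int) - 1 = t - 1 by omega]
        simpa using hb
      · have hdig : digB row ((t.toNat : Nat) : Int) = true := by
          rw [show ((t.toNat : Nat) : Int) = t by omega]; exact hd
        have := pvL_pos row t.toNat hdig
        omega

theorem run_mem (r : Int) (row : List Char) (cs : Nat) (hd : digB row (cs : Int) = true)
    (hb : digB row ((cs : Int) - 1) = false) : pvRun r row cs ∈ pvParseRow r 0 row := by
  have h0 : pvParseRow r 0 row = pvParseRow r ((0 : Nat) : Int) (row.drop 0) := by norm_num
  rw [h0]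
  obtain ⟨q, hq, h1, h2⟩ := parse_cover r row 0 cs (by omega) hd
  obtain ⟨cs', e1, _, hd', hb'⟩ := parse_mem r row 0 (Or.inl rfl) q hq
  subst e1
  simp only [pvRun] at h1 h2
  have hL' : 0 < pvL row cs' := pvL_pos row cs' hd'
  have hback1 : pvBackA row ((cs' : Int) + ((cs - cs' : Nat) : Int)) = cs' := by
    refine back_in_run row cs' hb' (cs - cs') (by omega)
  have hback2 : pvBackA row (cs : Int) = cs := back_stop row (cs : Int) hb (by omega)
    (by rw [digB_iff] at hd; omega)
  rw [show ((cs' : Int) + ((cs - cs' : Nat) : Int)) = (cs : Int) by omega, hback2] at hback1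
  have : cs = cs' := by omega
  subst this
  exact hq

theorem pvT_iff (row : List Char) (c t : Int) : t ∈ pvT row c ↔
    ((t = c - 1 ∧ digB row (c - 1) = true) ∨
     (t = c ∧ digB row c = true ∧ digB row (c - 1) = false) ∨
     (t = c + 1 ∧ digB row (c + 1) = true ∧ digB row c = false)) := by
  rcases hb1 : digB row (c - 1) <;> rcases hb2 : digB row c <;> rcases hb3 : digB row (c + 1) <;>
    simp [pvT, hb1, hb2, hb3]

theorem pvT_dig (row : List Char) (c t : Int) (h : t ∈ pvT row c) : digB row t = true := by
  rw [pvT_iff] at h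
  rcases h with ⟨e, h⟩ | ⟨e, h, _⟩ | ⟨e, h, _⟩ <;> (subst e; exact h)

-- a run overlaps the window [c-1,c+1] exactly when it contains one of A's kept window cells
theorem row_char (r : Int) (row : List Char) (c : Int) (q : Int × Int × Int × Int) :
    (q ∈ pvParseRow r 0 row ∧ (q.2.1 ≤ c + 1 ∧ c - 1 ≤ q.2.2.1)) ↔
      ∃ t ∈ pvT row c, q = pvRun r row (pvBackA row t).toNat := by
  constructor
  · rintro ⟨hq, ho1, ho2⟩
    have h0 : pvParseRow r 0 row = pvParseRow r ((0 : Nat) : Int) (row.drop 0) := by norm_num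
    rw [h0] at hq
    obtain ⟨cs, e1, _, hd, hb⟩ := parse_mem r row 0 (Or.inl rfl) q hq
    subst e1
    simp only [pvRun] at ho1 ho2 ⊢
    have hL : 0 < pvL row cs := pvL_pos row cs hd
    have hlen : (cs : Int) < (row.length : Int) := by rw [digB_iff] at hd; omega
    by_cases hcase : (cs : Int) ≤ c - 1
    · -- leftmost overlap cell is c-1
      have hdt : digB row (c - 1) = true := by
        have := dig_of_lt_L row cs (c - 1 - cs).toNat (by omega)
        rwa [show (cs : Int) + ((c - 1 - cs).toNat : Int) = c - 1 by omega] at this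
      refine ⟨c - 1, (pvT_iff row c (c - 1)).mpr (Or.inl ⟨rfl, hdt⟩), ?_⟩
      have hbk := back_in_run row cs hb (c - 1 - cs).toNat (by omega)
      rw [show (cs : Int) + ((c - 1 - cs).toNat : Int) = c - 1 by omega] at hbk
      rw [hbk]
      simp [pvRun]
    · have hbk : pvBackA row (cs : Int) = cs := back_stop row (cs : Int) hb (by omega) (by omega)
      rcases (show (cs : Int) = c ∨ (cs : Int) = c + 1 by omega) with h | h
      · have hdc : digB row c = true := by rw [← h]; exact hd
        have hbc : digB row (c - 1) = false := by rw [show c - 1 = (cs : Int) - 1 by omega]; exact hb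
        refine ⟨c, (pvT_iff row c c).mpr (Or.inr (Or.inl ⟨rfl, hdc, hbc⟩)), ?_⟩
        rw [← h, hbk]
        simp [pvRun]
      · have hdc : digB row (c + 1) = true := by rw [← h]; exact hd
        have hbc : digB row c = false := by rw [show c = (cs : Int) - 1 by omega]; exact hb
        refine ⟨c + 1, (pvT_iff row c (c + 1)).mpr (Or.inr (Or.inr ⟨rfl, hdc, hbc⟩)), ?_⟩
        rw [← h, hbk]
        simp [pvRun]
  · rintro ⟨t, ht, e⟩
    have hwt : t = c - 1 ∨ t = c ∨ t = c + 1 := by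
      rw [pvT_iff] at ht; tauto
    have hdt := pvT_dig row c t ht
    obtain ⟨cs, e1, e2, e3, e4⟩ := back_spec row t hdt
    have hdc : digB row (cs : Int) = true := by
      have := dig_of_lt_L row cs 0 (by omega)
      simpa using this
    rw [e1] at e
    simp only [Int.toNat_natCast] at e
    subst e
    refine ⟨run_mem r row cs hdc e2, ?_, ?_⟩ <;> (simp only [pvRun]; omega)

theorem rowB (r : Int) (row : List Char) (c : Int) :
    (pvParseRow r 0 row).filter (fun q => decide (q.2.1 ≤ c + 1 ∧ c - 1 ≤ q.2.2.1))
      = (pvT row c).map (fun t => pvRun r row (pvBackA row t).toNat) := by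
  have h0 : pvParseRow r 0 row = pvParseRow r ((0 : Nat) : Int) (row.drop 0) := by norm_num
  have hsort : (pvParseRow r 0 row).Pairwise (fun a b => a.2.2.1 < b.2.1) := by
    rw [h0]; exact parse_sorted r row 0 (Or.inl rfl)
  have hmem : ∀ q ∈ pvParseRow r 0 row, ∃ cs : Nat, q = pvRun r row cs ∧
      digB row (cs : Int) = true ∧ digB row ((cs : Int) - 1) = false := by
    intro q hq
    rw [h0] at hq
    obtain ⟨cs, e1, _, hd, hb⟩ := parse_mem r row 0 (Or.inl rfl) q hq
    exact ⟨cs, e1, hd, hb⟩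
  -- facts about pvT images
  have hTfact : ∀ t ∈ pvT row c, ∃ cs : Nat, pvBackA row t = (cs : Int) ∧
      (cs : Int) ≤ t ∧ digB row (cs : Int) = true ∧ digB row ((cs : Int) - 1) = false := by
    intro t ht
    obtain ⟨cs, e1, e2, e3, e4⟩ := back_spec row t (pvT_dig row c t ht)
    exact ⟨cs, e1, e3, by have := dig_of_lt_L row cs 0 (by omega); simpa using this, e2⟩
  -- pairwise over pvT: starts strictly increase
  have hTpair : (pvT row c).Pairwise (fun a b => pvBackA row a < pvBackA row b) := by
    have hcc : ∀ hb1 : digB row (c - 1) = true, ∀ hb2 : digB row c = false,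
        ∀ hb3 : digB row (c + 1) = true, pvBackA row (c - 1) < pvBackA row (c + 1) := by
      intro hb1 hb2 hb3
      obtain ⟨cs, e1, e2, _, _⟩ := back_spec row (c - 1) hb1
      have hstop : pvBackA row (c + 1) = c + 1 := by
        refine back_stop row (c + 1) (by simpa using hb2) ?_ ?_ <;> (rw [digB_iff] at hb3; omega)
      omega
    rcases hb1 : digB row (c - 1) <;> rcases hb2 : digB row c <;> rcases hb3 : digB row (c + 1) <;>
      simp [pvT, hb1, hb2, hb3] <;> exact hcc hb1 hb2 hb3
  apply List.eq_of_perm_of_sorted (le := fun a b => a.2.1 ≤ b.2.1)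
  · -- antisymmetry on members
    intro a b ha hb hab hba
    rw [List.mem_filter] at ha
    obtain ⟨csa, ea, _, _⟩ := hmem a ha.1
    obtain ⟨t, ht, eb⟩ := List.mem_map.mp hb
    obtain ⟨csb, e1, _, _, _⟩ := hTfact t ht
    rw [e1] at eb
    simp only [Int.toNat_natCast] at eb
    have : csa = csb := by
      subst ea eb
      simp only [pvRun] at hab hba
      omega
    subst this ea eb
    rfl
  · -- l1 sorted
    refine List.Pairwise.imp_of_mem ?_ (hsort.filter _)
    intro a b ha _ hr
    obtain ⟨csa, ea, hda, _⟩ := hmem a (List.mem_of_mem_filter ha)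
    have : 0 < pvL row csa := pvL_pos row csa hda
    subst ea
    simp only [pvRun] at hr ⊢
    omega
  · -- l2 sorted
    rw [List.pairwise_map]
    refine List.Pairwise.imp_of_mem ?_ hTpair
    intro a b ha hb hr
    obtain ⟨csa, e1, _, _, _⟩ := hTfact a ha
    obtain ⟨csb, e2, _, _, _⟩ := hTfact b hb
    simp only [pvRun, e1, e2]
    omega
  · -- permutation
    have hnd1 : (pvParseRow r 0 row).Nodup := by
      refine List.Pairwise.imp_of_mem ?_ hsort
      intro a b ha _ hr he
      obtain ⟨csa, ea, hda, _⟩ := hmem a ha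
      have : 0 < pvL row csa := pvL_pos row csa hda
      subst he ea
      simp only [pvRun] at hr
      omega
    have hnd2 : ((pvT row c).map (fun t => pvRun r row (pvBackA row t).toNat)).Nodup := by
      rw [List.Nodup, List.pairwise_map]
      refine List.Pairwise.imp_of_mem ?_ hTpair
      intro a b ha hb hr
      obtain ⟨csa, e1, _, _, _⟩ := hTfact a ha
      obtain ⟨csb, e2, _, _, _⟩ := hTfact b hb
      intro he
      have : ((csa : Int)) = csb := by
        have := congrArg (fun q => q.2.1) he
        simpa [pvRun, e1, e2] using this
      rw [e1, e2] at hr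
      omega
    rw [List.perm_ext_iff_of_nodup (hnd1.filter _) hnd2]
    intro q
    rw [List.mem_filter, List.mem_map]
    constructor
    · rintro ⟨hq, ho⟩
      simp only [decide_eq_true_eq] at ho
      obtain ⟨t, ht, e⟩ := (row_char r row c q).mp ⟨hq, ho⟩
      exact ⟨t, ht, e.symm⟩
    · rintro ⟨t, ht, e⟩
      obtain ⟨hq, ho⟩ := (row_char r row c q).mpr ⟨t, ht, e.symm⟩
      exact ⟨hq, by simpa using ho⟩

theorem range3 (x : Int) : PySem.List.pyRange (x - 1) (x + 2) 1 = [x - 1, x, x + 1] := by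
  rw [PySem.List.pyRange_one_cons (by omega), PySem.List.pyRange_one_cons (by omega),
      PySem.List.pyRange_one_cons (by omega), PySem.List.pyRange_one_eq_nil (by omega)]
  norm_num

theorem rowA (tr : Int) (row : List Char) (c : Int) (s : PySem.Set (Int × Int))
    (hs : ∀ x ∈ s, x.1 ≠ tr) :
    (PySem.List.pyRange (c - 1) (c + 2) 1).foldl (fun s tc =>
      if digB row tc = true then PySem.Set.add s (tr, pvBackA row tc) else s) s
      = s ++ (pvT row c).map (fun t => (tr, pvBackA row t)) := by
  rw [range3 c]
  simp only [List.foldl_cons, List.foldl_nil]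
  have hfresh : ∀ (s' : PySem.Set (Int × Int)), (∀ x ∈ s', x.1 ≠ tr) → ∀ v : Int,
      PySem.Set.add s' (tr, v) = s' ++ [(tr, v)] := by
    intro s' hs' v
    exact PySem.Set.add_of_not_mem (fun hv => (hs' _ hv) rfl)
  have hsapp : ∀ v : Int, ∀ x, x ∈ s ++ [((tr : Int), v)] → x.1 ≠ tr ∨ x = (tr, v) := by
    intro v x hx
    rcases List.mem_append.mp hx with h | h
    · exact Or.inl (hs x h)
    · simp at h; exact Or.inr h
  have hback0 : digB row (c - 1) = true → pvBackA row c = pvBackA row (c - 1) :=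
    fun h => back_step row c h
  have hback1 : digB row c = true → pvBackA row (c + 1) = pvBackA row c := by
    intro h
    have := back_step row (c + 1) (by rw [show c + 1 - 1 = c by ring]; exact h)
    rwa [show c + 1 - 1 = c by ring] at this
  have hstop1 : digB row c = false → digB row (c + 1) = true → pvBackA row (c + 1) = c + 1 := by
    intro h0 h1
    refine back_stop row (c + 1) (by rw [show c + 1 - 1 = c by ring]; exact h0) ?_ ?_ <;>
      (rw [digB_iff] at h1; omega)
  rcases hb1 : digB row (c - 1) <;> rcases hb2 : digB row c <;> rcases hb3 : digB row (c + 1)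
  · -- F F F
    simp [pvT, hb1, hb2, hb3]
  · -- F F T
    simp only [hb1, hb2, hb3, Bool.false_eq_true, reduceIte]
    rw [hfresh s hs _]
    simp [pvT, hb1, hb2, hb3]
  · -- F T F
    simp only [hb1, hb2, hb3, Bool.false_eq_true, reduceIte]
    rw [hfresh s hs _]
    simp [pvT, hb1, hb2, hb3]
  · -- F T T
    simp only [hb1, hb2, hb3, Bool.false_eq_true, reduceIte]
    rw [hfresh s hs _]
    have m1 : ((tr, pvBackA row (c + 1)) : Int × Int) ∈ s ++ [(tr, pvBackA row c)] := by
      rw [hback1 hb2]; simp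
    rw [PySem.Set.add_of_mem m1]
    simp [pvT, hb1, hb2, hb3]
  · -- T F F
    simp only [hb1, hb2, hb3, Bool.false_eq_true, reduceIte]
    rw [hfresh s hs _]
    simp [pvT, hb1, hb2, hb3]
  · -- T F T
    simp only [hb1, hb2, hb3, Bool.false_eq_true, reduceIte]
    rw [hfresh s hs _]
    have hnm : ((tr, pvBackA row (c + 1)) : Int × Int) ∉ s ++ [(tr, pvBackA row (c - 1))] := by
      intro hmem
      rcases hsapp _ _ hmem with h | h
      · exact h rfl
      · have h2 : pvBackA row (c + 1) = pvBackA row (c - 1) := congrArg Prod.snd h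
        obtain ⟨cs, e1, _, e3, _⟩ := back_spec row (c - 1) hb1
        rw [hstop1 hb2 hb3, e1] at h2
        omega
    rw [PySem.Set.add_of_not_mem hnm]
    simp [pvT, hb1, hb2, hb3]
  · -- T T F
    simp only [hb1, hb2, hb3, Bool.false_eq_true, reduceIte]
    rw [hfresh s hs _]
    have m1 : ((tr, pvBackA row c) : Int × Int) ∈ s ++ [(tr, pvBackA row (c - 1))] := by
      rw [hback0 hb1]; simp
    rw [PySem.Set.add_of_mem m1]
    simp [pvT, hb1, hb2, hb3]
  · -- T T T
    simp only [hb1, hb2, hb3, Bool.false_eq_true, reduceIte]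
    rw [hfresh s hs _]
    have m1 : ((tr, pvBackA row c) : Int × Int) ∈ s ++ [(tr, pvBackA row (c - 1))] := by
      rw [hback0 hb1]; simp
    rw [PySem.Set.add_of_mem m1]
    have m2 : ((tr, pvBackA row (c + 1)) : Int × Int) ∈ s ++ [(tr, pvBackA row (c - 1))] := by
      rw [hback1 hb2, hback0 hb1]; simp
    rw [PySem.Set.add_of_mem m2]
    simp [pvT, hb1, hb2, hb3]

-- assembly ---------------------------------------------------------------


-- the in-bounds rows of the gear's 3-row window, in increasing order
def pvWin (g : List (List Char)) (r : Int) : List Int :=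
  [r - 1, r, r + 1].filter (fun tr => decide (0 ≤ tr ∧ tr < (g.length : Int)))

theorem coords_eq (g : List (List Char)) (r c : Int) :
    pvSymPartCoords g r c =
      (pvWin g r).flatMap (fun tr =>
        (pvT (PySem.List.pyGetD g tr []) c).map (fun t => (tr, pvBackA (PySem.List.pyGetD g tr []) t))) := by
  have hstep : ∀ (tr : Int) (s : PySem.Set (Int × Int)), (∀ x ∈ s, x.1 ≠ tr) →
      ((PySem.List.pyRange (c - 1) (c + 2) 1).foldl (fun s tc =>
        if tr < 0 ∨ (g.length : Int) ≤ tr ∨ tc < 0 ∨ ((PySem.List.pyGetD g tr []).length : Int) ≤ tc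
            ∨ ¬ PySem.Chars.isdigit (PySem.List.pyGetD (PySem.List.pyGetD g tr []) tc ' ') = true then
          s
        else PySem.Set.add s (tr, pvBackA (PySem.List.pyGetD g tr []) tc)) s)
      = s ++ (if 0 ≤ tr ∧ tr < (g.length : Int) then
          (pvT (PySem.List.pyGetD g tr []) c).map (fun t => (tr, pvBackA (PySem.List.pyGetD g tr []) t))
        else []) := by
    intro tr s hs
    by_cases hv : 0 ≤ tr ∧ tr < (g.length : Int)
    · rw [if_pos hv]
      have hfun : (fun (s : PySem.Set (Int × Int)) (tc : Int) =>
          if tr < 0 ∨ (g.length : Int) ≤ tr ∨ tc < 0 ∨ ((PySem.List.pyGetD g tr []).length : Int) ≤ tc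
              ∨ ¬ PySem.Chars.isdigit (PySem.List.pyGetD (PySem.List.pyGetD g tr []) tc ' ') = true then
            s
          else PySem.Set.add s (tr, pvBackA (PySem.List.pyGetD g tr []) tc))
          = (fun (s : PySem.Set (Int × Int)) (tc : Int) =>
              if digB (PySem.List.pyGetD g tr []) tc = true then
                PySem.Set.add s (tr, pvBackA (PySem.List.pyGetD g tr []) tc)
              else s) := by
        funext s' tc
        by_cases hd : digB (PySem.List.pyGetD g tr []) tc = true
        · rw [if_pos hd, if_neg]
          rw [digB_iff] at hd
          rintro (h | h | h | h | h)
          · omega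
          · omega
          · omega
          · omega
          · exact h hd.2.2
        · rw [if_neg hd, if_pos]
          rw [digB] at hd
          simp only [Bool.and_eq_true, decide_eq_true_eq, not_and, Bool.not_eq_true] at hd
          by_cases h1 : 0 ≤ tc
          · by_cases h2 : tc < ((PySem.List.pyGetD g tr []).length : Int)
            · have hfalse := hd ⟨h1, h2⟩
              exact Or.inr (Or.inr (Or.inr (Or.inr (by simp [hfalse]))))
            · exact Or.inr (Or.inr (Or.inr (Or.inl (by omega))))
          · exact Or.inr (Or.inr (Or.inl (by omega)))
      rw [hfun]
      exact rowA tr (PySem.List.pyGetD g tr []) c s hs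
    · rw [if_neg hv]
      have hcond : ∀ (s' : PySem.Set (Int × Int)) (tc : Int),
          (if tr < 0 ∨ (g.length : Int) ≤ tr ∨ tc < 0 ∨ ((PySem.List.pyGetD g tr []).length : Int) ≤ tc
              ∨ ¬ PySem.Chars.isdigit (PySem.List.pyGetD (PySem.List.pyGetD g tr []) tc ' ') = true then
            s'
          else PySem.Set.add s' (tr, pvBackA (PySem.List.pyGetD g tr []) tc)) = s' := by
        intro s' tc
        rw [if_pos]
        rcases (show tr < 0 ∨ (g.length : Int) ≤ tr by omega) with h | h
        · exact Or.inl h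
        · exact Or.inr (Or.inl h)
      rw [PySem.List.foldl_congr_mem (PySem.List.pyRange (c - 1) (c + 2) 1) _
            (fun (s' : PySem.Set (Int × Int)) (_ : Int) => s') s
            (by intro s' tc _; exact hcond s' tc),
          PySem.List.foldl_ignore]
      simp
  have hWfst : ∀ (tr : Int), ∀ x ∈ (if 0 ≤ tr ∧ tr < (g.length : Int) then
      (pvT (PySem.List.pyGetD g tr []) c).map (fun t => (tr, pvBackA (PySem.List.pyGetD g tr []) t))
      else ([] : List (Int × Int))), x.1 = tr := by
    intro tr x hx
    split_ifs at hx
    · obtain ⟨t, _, e⟩ := List.mem_map.mp hx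
      rw [← e]
    · simp at hx
  unfold pvSymPartCoords
  rw [range3 r]
  simp only [List.foldl_cons, List.foldl_nil]
  rw [hstep (r - 1) PySem.Set.empty (by intro x hx; simp [PySem.Set.empty] at hx)]
  rw [hstep r (PySem.Set.empty ++ (if 0 ≤ (r - 1) ∧ (r - 1) < (g.length : Int) then
        (pvT (PySem.List.pyGetD g (r - 1) []) c).map (fun t => ((r - 1), pvBackA (PySem.List.pyGetD g (r - 1) []) t))
      else [])) (by
    intro x hx
    rcases List.mem_append.mp hx with h | h
    · simp [PySem.Set.empty] at h
    · have := hWfst (r - 1) x h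
      omega)]
  rw [hstep (r + 1) ((PySem.Set.empty ++ (if 0 ≤ (r - 1) ∧ (r - 1) < (g.length : Int) then
        (pvT (PySem.List.pyGetD g (r - 1) []) c).map (fun t => ((r - 1), pvBackA (PySem.List.pyGetD g (r - 1) []) t))
      else [])) ++ (if 0 ≤ (r) ∧ (r) < (g.length : Int) then
        (pvT (PySem.List.pyGetD g (r) []) c).map (fun t => ((r), pvBackA (PySem.List.pyGetD g (r) []) t))
      else [])) (by
    intro x hx
    rcases List.mem_append.mp hx with h | h
    · rcases List.mem_append.mp h with h2 | h2
      · simp [PySem.Set.empty] at h2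
      · have := hWfst (r - 1) x h2
        omega
    · have := hWfst r x h
      omega)]
  simp only [pvWin, List.filter_cons, List.filter_nil, decide_eq_true_eq]
  split_ifs <;> simp [PySem.Set.empty]

theorem pv_pyGetD_cons {α : Type} (x : α) (l : List α) (i : Int) (d : α) (h : 1 ≤ i) :
    PySem.List.pyGetD (x :: l) i d = PySem.List.pyGetD l (i - 1) d := by
  rw [PySem.List.pyGetD_of_nonneg _ _ (by omega), PySem.List.pyGetD_of_nonneg _ _ (by omega)]
  rw [show i.toNat = (i - 1).toNat + 1 by omega]
  rfl

theorem winFlat {β : Type} (r : Int) (F : Int → List Char → List β) :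
    ∀ (l : List (List Char)) (k : Int),
      (PySem.List.enumerate l k).flatMap
          (fun p => if r - 1 ≤ p.1 ∧ p.1 ≤ r + 1 then F p.1 p.2 else [])
        = (if k ≤ r - 1 ∧ r - 1 < k + (l.length : Int) then F (r - 1) (PySem.List.pyGetD l (r - 1 - k) []) else [])
          ++ (if k ≤ r ∧ r < k + (l.length : Int) then F r (PySem.List.pyGetD l (r - k) []) else [])
          ++ (if k ≤ r + 1 ∧ r + 1 < k + (l.length : Int) then F (r + 1) (PySem.List.pyGetD l (r + 1 - k) []) else []) := by
  intro l
  induction l with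
  | nil =>
    intro k
    rw [PySem.List.enumerate_nil]
    rw [if_neg (by simp only [List.length_nil]; push_cast; omega),
        if_neg (by simp only [List.length_nil]; push_cast; omega),
        if_neg (by simp only [List.length_nil]; push_cast; omega)]
    rfl
  | cons row l ih =>
    intro k
    rw [PySem.List.enumerate_cons, List.flatMap_cons, ih (k + 1)]
    have hshift : ∀ j : Int, k < j →
        (if k ≤ j ∧ j < k + ((row :: l).length : Int) then F j (PySem.List.pyGetD (row :: l) (j - k) []) else [])
        = (if k + 1 ≤ j ∧ j < (k + 1) + (l.length : Int) then F j (PySem.List.pyGetD l (j - (k + 1)) []) else []) := by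
      intro j hj
      by_cases h : k + 1 ≤ j ∧ j < (k + 1) + (l.length : Int)
      · rw [if_pos (by simp only [List.length_cons]; push_cast; omega), if_pos h,
            pv_pyGetD_cons _ _ _ _ (by omega), show j - k - 1 = j - (k + 1) by ring]
      · rw [if_neg (by simp only [List.length_cons]; push_cast; omega), if_neg h]
    have hhead : ∀ j : Int, j = k →
        (if k ≤ j ∧ j < k + ((row :: l).length : Int) then F j (PySem.List.pyGetD (row :: l) (j - k) []) else [])
        = F k row := by
      intro j hj
      subst hj
      rw [if_pos (by simp only [List.length_cons]; push_cast; omega),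
          show j - j = (0 : Int) by ring, PySem.List.pyGetD_zero_cons]
    have hlow : ∀ j : Int, j < k →
        (if k ≤ j ∧ j < k + ((row :: l).length : Int) then F j (PySem.List.pyGetD (row :: l) (j - k) []) else [])
        = ([] : List β) := by
      intro j hj
      rw [if_neg (by omega)]
    have hlow' : ∀ j : Int, j ≤ k →
        (if k + 1 ≤ j ∧ j < (k + 1) + (l.length : Int) then F j (PySem.List.pyGetD l (j - (k + 1)) []) else [])
        = ([] : List β) := by
      intro j hj
      rw [if_neg (by omega)]
    by_cases h1 : k < r - 1
    · rw [if_neg (by omega)]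
      rw [hshift (r - 1) (by omega), hshift r (by omega), hshift (r + 1) (by omega)]
      simp
    · by_cases h2 : k = r - 1
      · rw [if_pos (by omega)]
        rw [hhead (r - 1) (by omega), hlow' (r - 1) (by omega),
            hshift r (by omega), hshift (r + 1) (by omega)]
        simp
      · by_cases h3 : k = r
        · rw [if_pos (by omega)]
          rw [hhead r (by omega), hlow (r - 1) (by omega), hlow' (r - 1) (by omega),
              hlow' r (by omega), hshift (r + 1) (by omega)]
          simp
        · by_cases h4 : k = r + 1
          · rw [if_pos (by omega)]
            rw [hhead (r + 1) (by omega), hlow (r - 1) (by omega), hlow (r) (by omega),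
                hlow' (r - 1) (by omega), hlow' r (by omega), hlow' (r + 1) (by omega)]
            simp
          · rw [if_neg (by omega)]
            rw [hlow (r - 1) (by omega), hlow r (by omega), hlow (r + 1) (by omega),
                hlow' (r - 1) (by omega), hlow' r (by omega), hlow' (r + 1) (by omega)]
            simp

theorem adj_eq (g : List (List Char)) (r c : Int) :
    (pvNums g).filter (fun t =>
        decide (r - 1 ≤ t.1 ∧ t.1 ≤ r + 1 ∧ t.2.1 ≤ c + 1 ∧ c - 1 ≤ t.2.2.1))
      = (pvWin g r).flatMap (fun tr =>
          (pvT (PySem.List.pyGetD g tr []) c).map (fun t =>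
            pvRun tr (PySem.List.pyGetD g tr []) (pvBackA (PySem.List.pyGetD g tr []) t).toNat)) := by
  unfold pvNums
  rw [PySem.List.foldl_append_eq_flatMap]
  simp only [List.nil_append]
  rw [List.filter_flatMap]
  have hper : ∀ p ∈ PySem.List.enumerate g 0,
      (pvParseRow p.1 0 p.2).filter (fun t =>
          decide (r - 1 ≤ t.1 ∧ t.1 ≤ r + 1 ∧ t.2.1 ≤ c + 1 ∧ c - 1 ≤ t.2.2.1))
        = (fun p : Int × List Char => if r - 1 ≤ p.1 ∧ p.1 ≤ r + 1 then
            (pvT p.2 c).map (fun t => pvRun p.1 p.2 (pvBackA p.2 t).toNat) else []) p := by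
    rintro ⟨i, row⟩ _
    simp only
    have h0 : pvParseRow i 0 row = pvParseRow i ((0 : Nat) : Int) (row.drop 0) := by norm_num
    by_cases hw : r - 1 ≤ i ∧ i ≤ r + 1
    · rw [if_pos hw, ← rowB i row c]
      apply List.filter_congr
      intro q hq
      rw [h0] at hq
      obtain ⟨cs, e1, _, _, _⟩ := parse_mem i row 0 (Or.inl rfl) q hq
      subst e1
      simp only [pvRun, decide_eq_decide]
      constructor
      · tauto
      · intro hov; exact ⟨hw.1, hw.2, hov⟩
    · rw [if_neg hw]
      rw [List.filter_eq_nil_iff]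
      intro q hq
      rw [h0] at hq
      obtain ⟨cs, e1, _, _, _⟩ := parse_mem i row 0 (Or.inl rfl) q hq
      subst e1
      simp only [pvRun, decide_eq_true_eq]
      tauto
  rw [List.flatMap_congr hper]
  rw [winFlat r (fun tr row => (pvT row c).map (fun t => pvRun tr row (pvBackA row t).toNat)) g 0]
  simp only [zero_add, sub_zero]
  simp only [pvWin, List.filter_cons, List.filter_nil, decide_eq_true_eq]
  split_ifs <;> simp

theorem partnums_eq (g : List (List Char)) (r c : Int) :
    pvGetPartNums g (pvSymPartCoords g r c)
      = ((pvNums g).filter (fun t =>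
          decide (r - 1 ≤ t.1 ∧ t.1 ≤ r + 1 ∧ t.2.1 ≤ c + 1 ∧ c - 1 ≤ t.2.2.1))).map
          (fun t => t.2.2.2) := by
  unfold pvGetPartNums
  rw [PySem.List.foldl_append_singleton_eq_map, List.nil_append]
  rw [coords_eq, adj_eq]
  rw [List.map_flatMap, List.map_flatMap]
  apply List.flatMap_congr
  intro tr htr
  rw [List.map_map, List.map_map]
  apply List.map_congr_left
  intro t ht
  simp only [Function.comp]
  obtain ⟨cs, e1, _, _, _⟩ := back_spec (PySem.List.pyGetD g tr []) t (pvT_dig _ c t ht)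
  rw [e1]
  simp only [Int.toNat_natCast, pvRun, pvVal]
  rw [read_eq]

theorem len_eq2 (g : List (List Char)) (r c : Int) :
    (pvSymPartCoords g r c).length = ((pvNums g).filter (fun t =>
        decide (r - 1 ≤ t.1 ∧ t.1 ≤ r + 1 ∧ t.2.1 ≤ c + 1 ∧ c - 1 ≤ t.2.2.1))).length := by
  rw [coords_eq, adj_eq]
  simp [List.length_flatMap, Function.comp]

-- ===== VERDICT (by name: the statement is the Claim_ definition above) =====
theorem get_gear_ratios_spec : Claim_equal_get_gear_ratios := by
  intro grid _
  unfold Spec_get_gear_ratios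
  simp only [get_gear_ratios, get_gear_ratios_alt]
  apply PySem.List.foldl_congr_mem
  intro acc p _
  apply PySem.List.foldl_congr_mem
  intro acc2 q _
  by_cases hq : q.2 = '*'
  · rw [if_neg (by simp [hq]), if_pos hq]
    have hns := partnums_eq (grid.map (·.toList)) p.1 q.1
    have hlen := len_eq2 (grid.map (·.toList)) p.1 q.1
    rw [hns]
    refine if_congr ?_ rfl rfl
    simp only [PySem.Set.len, List.length_map]
    rw [← hlen]
    constructor
    · intro h; exact_mod_cast h
    · intro h; exact_mod_cast h
  · rw [if_pos (by simp [hq]), if_neg hq]
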